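-- pv_equiv track=rewrite | github.com/Thapamanish/450DSA | 450DSA/String/secondMostRepeatedString.py | secFrequent
-- ===== SOURCE A (Python) =====
-- def secFrequent(arr):
--     freq = {}
--     for string in arr:
--         if string in freq:
--             freq[string] += 1
--         else:
--             freq[string] = 1
--
--     firstMax = float('-INF')
--     secondMax = float('-INF')
--
--     for key, value in freq.items():
--         if value > firstMax:
--             secondMax = firstMax
--             firstMax = value
--
--         elif secondMax < value < firstMax:
--             secondMax = value
--
--
--     for key, value in freq.items():
--         if value == secondMax:
--             return key
-- ===== SOURCE B (Python) =====
-- def secFrequent(arr):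
--     freq = {}
--     for string in arr:
--         freq[string] = freq.get(string, 0) + 1
--     distinct = sorted(set(freq.values()), reverse=True)
--     if len(distinct) < 2:
--         return None
--     target = distinct[1]
--     for key, value in freq.items():
--         if value == target:
--             return key
-- ===== Notes on version B (the rewrite author's own statement) =====
-- stated objective: simpler
-- what changed: Replaces A's single-pass top-two tracking with float('-INF') sentinels by sorting the distinct frequency values descending and taking the second one as the target count.
import Mathlib
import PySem

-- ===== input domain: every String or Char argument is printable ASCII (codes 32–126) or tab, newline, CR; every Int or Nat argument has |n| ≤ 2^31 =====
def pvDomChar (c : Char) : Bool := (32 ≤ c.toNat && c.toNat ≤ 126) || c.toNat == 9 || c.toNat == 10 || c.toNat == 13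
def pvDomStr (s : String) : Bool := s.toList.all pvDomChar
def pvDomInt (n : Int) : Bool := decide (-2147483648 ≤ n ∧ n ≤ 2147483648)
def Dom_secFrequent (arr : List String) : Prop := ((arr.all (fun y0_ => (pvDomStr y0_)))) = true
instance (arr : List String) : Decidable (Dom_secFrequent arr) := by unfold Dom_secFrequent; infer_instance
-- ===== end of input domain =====

-- B replaces A's single-pass top-two tracking by sorting the distinct frequencies descending
-- and taking the second one (objective: simpler); same return value on every input.

-- ===== PORT A =====
-- `firstMax`/`secondMax` start as float('-INF'): modelled as `Option Int` with `none` = -INF.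
-- Exact here: every compared value is a finite int, `<`/`>` against -INF behave as in `pvLt`,
-- and `value == secondMax` is false whenever `secondMax` is still -INF (`some _ = none` is false).
def pvLt (a b : Option Int) : Bool :=
  match a, b with
  | none, some _ => true
  | some x, some y => decide (x < y)
  | _, none => false

def pvStep (p : Option Int × Option Int) (v : Int) : Option Int × Option Int :=
  if pvLt p.1 (some v) then (some v, p.1)
  else if pvLt p.2 (some v) && pvLt (some v) p.1 then (p.1, some v)
  else p

def secFrequent (arr : List String) : Option String :=
  let freq := arr.foldl (fun d s =>
      if d.contains s then d.insert s (d.getD s 0 + 1) else d.insert s 1)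
    PySem.Dict.empty
  let ms := freq.items.foldl (fun p kv => pvStep p kv.2) (none, none)
  freq.items.findSome? (fun kv => if some kv.2 = ms.2 then some kv.1 else none)

-- ===== PORT B =====
def secFrequent_alt (arr : List String) : Option String :=
  let freq := arr.foldl (fun d s => d.insert s (d.getD s 0 + 1))
    (PySem.Dict.empty : PySem.Dict String Int)
  let distinct := PySem.List.sorted (PySem.Set.ofList freq.values) (fun v => v) true
  if distinct.length < 2 then none
  else
    -- `distinct[1]`: the guard guarantees index 1 is in range, so total `pyGetD` is exact here
    let target := PySem.List.pyGetD distinct 1 0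
    freq.items.findSome? (fun kv => if kv.2 = target then some kv.1 else none)

-- ===== PRECONDITION & SPEC =====
def Spec_secFrequent (arr : List String) (out : Option String) : Prop := out = secFrequent_alt arr
instance (arr : List String) (out : Option String) : Decidable (Spec_secFrequent arr out) := by unfold Spec_secFrequent; infer_instance

-- ===== CLAIM (what is proved, stated in full; the proofs are below) =====
def Claim_equal_secFrequent : Prop := ∀ (arr : List String), Dom_secFrequent arr → Spec_secFrequent arr (secFrequent arr)

-- ===== LEMMAS AND PROOFS =====

-- second-highest distinct value of a list (proof-side characterisation of A's tracking loop)
def pvSndMax (vs : List Int) : Option Int :=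
  match vs.max? with
  | none => none
  | some m => (vs.filter (fun v => decide (v < m))).max?

theorem pv_max?_append_singleton (l : List Int) (v : Int) :
    (l ++ [v]).max? = some (match l.max? with | none => v | some m => max m v) := by
  cases h : l.max? with
  | none => simp_all
  | some m =>
    have hm := List.max?_eq_some_iff.mp h
    rw [List.max?_eq_some_iff]
    constructor
    · rcases max_choice m v with hc | hc <;> simp [hc, hm.1]
    · intro b hb
      rcases List.mem_append.mp hb with hb | hb
      · exact le_trans (hm.2 b hb) (le_max_left m v)
      · simp at hb; simp [hb]

theorem pv_foldl_step (vs : List Int) :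
    vs.foldl pvStep (none, none) = (vs.max?, pvSndMax vs) := by
  induction vs using List.reverseRecOn with
  | nil => rfl
  | append_singleton l v ih =>
    rw [List.foldl_append, ih]
    cases hm : l.max? with
    | none =>
      have : l = [] := List.max?_eq_none_iff.mp hm
      subst this
      simp [pvStep, pvLt, pvSndMax]
    | some m =>
      have hmax := List.max?_eq_some_iff.mp hm
      have hma : (l ++ [v]).max? = some (max m v) := by
        rw [pv_max?_append_singleton, hm]
      by_cases hlt : m < v
      · -- new maximum: filter (< v) keeps all of l
        have h1 : (l ++ [v]).max? = some v := by
          rw [hma, max_eq_right (le_of_lt hlt)]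
        have hfe : l.filter (fun x => decide (x < v)) = l :=
          List.filter_eq_self.mpr (fun a ha => by
            simpa using lt_of_le_of_lt (hmax.2 a ha) hlt)
        simp [pvStep, pvLt, hm, hlt, pvSndMax, h1, List.filter_append, hfe]
      · have h1 : (l ++ [v]).max? = some m := by
          rw [hma, max_eq_left (le_of_not_gt hlt)]
        by_cases hev : v = m
        · -- value equal to current max: nothing changes
          subst hev
          simp [pvStep, pvLt, hm, pvSndMax, h1, List.filter_append]
        · have hvm : v < m := lt_of_le_of_ne (le_of_not_gt hlt) hev
          have hfa : (l ++ [v]).filter (fun x => decide (x < m)) =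
              l.filter (fun x => decide (x < m)) ++ [v] := by
            simp [List.filter_append, hvm]
          cases hs : (l.filter (fun x => decide (x < m))).max? with
          | none =>
            have hnil := List.max?_eq_none_iff.mp hs
            simp [pvStep, pvLt, hlt, hvm, pvSndMax, hm, h1, hfa, hnil]
          | some w =>
            rw [show pvSndMax l = some w by simp [pvSndMax, hm, hs]]
            have h2 : (l.filter (fun x => decide (x < m)) ++ [v]).max? = some (max w v) := by
              rw [pv_max?_append_singleton, hs]
            by_cases hwv : w < v
            · simp [pvStep, pvLt, hlt, hvm, hwv, pvSndMax, h1, hfa, h2,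
                max_eq_right (le_of_lt hwv)]
            · simp [pvStep, pvLt, hlt, hvm, hwv, pvSndMax, h1, hfa, h2,
                max_eq_left (le_of_not_gt hwv)]

-- the sorted-descending distinct-values list determines max? and pvSndMax
theorem pv_sorted_head_snd (vs : List Int) :
    (∀ d, PySem.List.sorted (PySem.Set.ofList vs) (fun v => v) true = d →
      (d = [] → vs = []) ∧
      (∀ m t, d = m :: t →
        vs.max? = some m ∧ pvSndMax vs = t.head?)) := by
  intro d hd
  have hperm : d.Perm (PySem.Set.ofList vs) := hd ▸ PySem.List.sorted_perm _ _ _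
  have hmem : ∀ x, x ∈ d ↔ x ∈ vs := by
    intro x
    rw [hperm.mem_iff, PySem.Set.mem_ofList]
  have hnd : d.Nodup := hperm.nodup_iff.mpr (PySem.Set.nodup_ofList vs)
  have hge : d.Pairwise (fun a b => b ≤ a) := hd ▸ PySem.List.sorted_pairwise_rev _ _
  have hgt : d.Pairwise (fun a b => b < a) :=
    (hge.and hnd).imp (fun h => lt_of_le_of_ne h.1 (Ne.symm h.2))
  constructor
  · intro h0
    subst h0
    cases hv : vs with
    | nil => rfl
    | cons a tl => exact absurd ((hmem a).mpr (by simp [hv])) (by simp)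
  · intro m t hmt
    subst hmt
    have hmvs : m ∈ vs := (hmem m).mp (by simp)
    have hle : ∀ y ∈ vs, y ≤ m := by
      intro y hy
      rcases List.mem_cons.mp ((hmem y).mpr hy) with h | h
      · exact h.le
      · exact le_of_lt ((List.pairwise_cons.mp hgt).1 y h)
    have hmax : vs.max? = some m := List.max?_eq_some_iff.mpr ⟨hmvs, hle⟩
    refine ⟨hmax, ?_⟩
    cases t with
    | nil =>
      -- every element equals m, so nothing is < m
      have : vs.filter (fun v => decide (v < m)) = [] := by
        rw [List.filter_eq_nil_iff]
        intro a ha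
        have : a = m := by have := (hmem a).mpr ha; simpa using this
        simp [this]
      simp [pvSndMax, hmax, this]
    | cons s r =>
      have hsm : s < m := (List.pairwise_cons.mp hgt).1 s (by simp)
      have hsvs : s ∈ vs := (hmem s).mp (by simp)
      have hsecond : (vs.filter (fun v => decide (v < m))).max? = some s := by
        rw [List.max?_eq_some_iff]
        constructor
        · simp [List.mem_filter, hsvs, hsm]
        · intro b hb
          rcases List.mem_filter.mp hb with ⟨hbv, hblt⟩
          rcases List.mem_cons.mp ((hmem b).mpr hbv) with h | h
          · exact absurd hblt (by simp [h])
          · rcases List.mem_cons.mp h with h | h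
            · exact le_of_eq h
            · exact le_of_lt ((List.pairwise_cons.mp (List.pairwise_cons.mp hgt).2).1 b h)
      simp [pvSndMax, hmax, hsecond]

-- core equivalence over an arbitrary items list
theorem pv_core_items (items : List (String × Int)) :
    items.findSome? (fun kv =>
        if some kv.2 = (items.foldl (fun p kv => pvStep p kv.2) (none, none)).2
        then some kv.1 else none) =
    (if (PySem.List.sorted (PySem.Set.ofList (items.map (·.2))) (fun v => v) true).length < 2
     then none
     else items.findSome? (fun kv =>
       if kv.2 = PySem.List.pyGetD
           (PySem.List.sorted (PySem.Set.ofList (items.map (·.2))) (fun v => v) true) 1 0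
       then some kv.1 else none)) := by
  have hfold : items.foldl (fun p kv => pvStep p kv.2) (none, none)
      = (items.map (·.2)).foldl pvStep (none, none) := by rw [List.foldl_map]
  rw [hfold, pv_foldl_step]
  have hchar := pv_sorted_head_snd (items.map (·.2))
      (PySem.List.sorted (PySem.Set.ofList (items.map (·.2))) (fun v => v) true) rfl
  cases hd : PySem.List.sorted (PySem.Set.ofList (items.map (·.2))) (fun v => v) true with
  | nil =>
    have h0 : items.map (·.2) = [] := (hchar.1) hd
    have h1 : items = [] := List.map_eq_nil_iff.mp h0
    subst h1
    rfl
  | cons m t =>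
    rcases hchar.2 m t hd with ⟨_, hsnd⟩
    rw [hsnd]
    cases t with
    | nil =>
      simp
    | cons s r =>
      simp [PySem.List.pyGetD]

-- core equivalence for any frequency dict
theorem pv_core (d : PySem.Dict String Int) :
    d.items.findSome? (fun kv =>
        if some kv.2 = (d.items.foldl (fun p kv => pvStep p kv.2) (none, none)).2
        then some kv.1 else none) =
    (if (PySem.List.sorted (PySem.Set.ofList d.values) (fun v => v) true).length < 2
     then none
     else d.items.findSome? (fun kv =>
       if kv.2 = PySem.List.pyGetD
           (PySem.List.sorted (PySem.Set.ofList d.values) (fun v => v) true) 1 0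
       then some kv.1 else none)) := by
  have hv : d.values = d.items.map (·.2) := rfl
  rw [hv]
  exact pv_core_items d.items

theorem pv_main (arr : List String) : secFrequent arr = secFrequent_alt arr := by
  have hf : (fun (d : PySem.Dict String Int) s =>
      if d.contains s then d.insert s (d.getD s 0 + 1) else d.insert s 1)
      = (fun (d : PySem.Dict String Int) s => d.insert s (d.getD s 0 + 1)) := by
    funext d s
    by_cases h : d.contains s
    · simp [h]
    · have h' : d.contains s = false := by simpa using h
      have h0 : d.getD s 0 = 0 := by simp [pysem, h']
      simp [h, h0]
  simp only [secFrequent, secFrequent_alt]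
  rw [hf]
  exact pv_core (arr.foldl (fun (d : PySem.Dict String Int) s => d.insert s (d.getD s 0 + 1))
    PySem.Dict.empty)

-- ===== VERDICT (by name: the statement is the Claim_ definition above) =====
theorem secFrequent_spec : Claim_equal_secFrequent := by
  intro arr _
  unfold Spec_secFrequent
  exact pv_main arr
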